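-- pv_equiv track=rewrite | github.com/miliar/Code_Jam_Webscraper | solutions_python/Problem_181/871.py | getW
-- ===== SOURCE A (Python) =====
-- def getW(s):
--     output = ''
--     for x in s:
--         if x+output > output+x:
--             output = x+output
--         else:
--             output = output+x
--     return output
-- ===== SOURCE B (Python) =====
-- def getW(s):
--     # O(n): track head char c and first char differing from c; O(1) prepend/append decision.
--     if not s:
--         return ''
--     it = iter(s)
--     first = next(it)
--     front = [first]   # front part of the result, stored reversed
--     back = []
--     c = first         # current first character of the result
--     d = None          # first character in the result differing from c (None if homogeneous)
--     for x in it: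
--         if c < x:
--             front.append(x)
--             d = c
--             c = x
--         elif x == c and d is not None and d < c:
--             front.append(x)
--         else:
--             back.append(x)
--             if x < c and d is None:
--                 d = x
--     return ''.join(reversed(front)) + ''.join(back)
-- ===== Notes on version B (the rewrite author's own statement) =====
-- stated objective: faster
-- what changed: Instead of rebuilding the whole string and comparing x+output vs output+x at every step (quadratic), B keeps the result as reversed-front/back lists plus two O(1) summary values (the head char and the first char differing from it) which fully determine the comparison, and joins once at the end.
import Mathlib
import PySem

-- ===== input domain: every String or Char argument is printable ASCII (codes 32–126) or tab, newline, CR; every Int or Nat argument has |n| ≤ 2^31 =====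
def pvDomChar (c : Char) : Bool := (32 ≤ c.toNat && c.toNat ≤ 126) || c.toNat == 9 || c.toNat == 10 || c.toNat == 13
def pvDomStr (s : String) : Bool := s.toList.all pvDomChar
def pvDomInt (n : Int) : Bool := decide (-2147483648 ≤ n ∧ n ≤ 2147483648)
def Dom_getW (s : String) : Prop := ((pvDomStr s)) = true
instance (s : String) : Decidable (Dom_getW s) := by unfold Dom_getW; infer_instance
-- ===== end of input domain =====

-- B replaces A's per-character whole-string concatenations and comparison with an O(1)
-- decision from two tracked summary values (head char, first char differing from it).

-- ===== PORT A =====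
-- Python's '>' on strings: lexicographic by code point, a longer string beats its proper prefix.
def pyStrGT : List Char → List Char → Bool
  | [], _ => false
  | _ :: _, [] => true
  | a :: as, b :: bs => if a = b then pyStrGT as bs else decide (b < a)

def getW (s : String) : String :=
  String.ofList (s.toList.foldl
    (fun output x => if pyStrGT (x :: output) (output ++ [x]) then x :: output else output ++ [x])
    [])

-- ===== PORT B =====
-- state: (front stored reversed, back, c = head char of result, d = first char ≠ c, none if homogeneous)
def getW_altStep : (List Char × List Char × Char × Option Char) → Char → (List Char × List Char × Char × Option Char)
  | (front, back, c, d), x =>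
    if c < x then (front ++ [x], back, x, some c)
    else if x == c && (match d with | some n => decide (n < c) | none => false) then
      (front ++ [x], back, c, d)
    else
      (front, back ++ [x], c, if x < c ∧ d = none then some x else d)

def getW_alt (s : String) : String :=
  match s.toList with
  | [] => ""
  | first :: rest =>
    let st := rest.foldl getW_altStep ([first], [], first, none)
    String.ofList (st.1.reverse ++ st.2.1)

-- ===== PRECONDITION & SPEC =====
def Spec_getW (s : String) (out : String) : Prop := out = getW_alt s
instance (s : String) (out : String) : Decidable (Spec_getW s out) := by unfold Spec_getW; infer_instance

-- ===== CLAIM (what is proved, stated in full; the proofs are below) =====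
def Claim_equal_getW : Prop := ∀ (s : String), Dom_getW s → Spec_getW s (getW s)

-- ===== LEMMAS AND PROOFS =====

def aStep (output : List Char) (x : Char) : List Char :=
  if pyStrGT (x :: output) (output ++ [x]) then x :: output else output ++ [x]

-- A's comparison is decided by the first character of output that differs from x.
theorem pyStrGT_char (x : Char) (out : List Char) :
    pyStrGT (x :: out) (out ++ [x])
      = (match out.find? (· != x) with | none => false | some n => decide (n < x)) := by
  induction out with
  | nil => simp [pyStrGT]
  | cons h t ih =>
    by_cases hx : h = x
    · subst hx
      simpa [pyStrGT, List.find?] using ih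
    · rw [show ((h :: t) ++ [x]) = h :: (t ++ [x]) from rfl,
         List.find?_cons_of_pos (by simp [hx])]
      simp only [pyStrGT, if_neg (fun h' : x = h => hx h'.symm)]

theorem step_inv (front back : List Char) (c : Char) (d : Option Char) (x : Char)
    (hhead : (front.reverse ++ back).head? = some c)
    (hfind : (front.reverse ++ back).find? (· != c) = d) :
    (getW_altStep (front, back, c, d) x).1.reverse ++ (getW_altStep (front, back, c, d) x).2.1
        = aStep (front.reverse ++ back) x ∧
    ((getW_altStep (front, back, c, d) x).1.reverse ++ (getW_altStep (front, back, c, d) x).2.1).head?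
        = some (getW_altStep (front, back, c, d) x).2.2.1 ∧
    ((getW_altStep (front, back, c, d) x).1.reverse ++ (getW_altStep (front, back, c, d) x).2.1).find?
        (· != (getW_altStep (front, back, c, d) x).2.2.1)
        = (getW_altStep (front, back, c, d) x).2.2.2 := by
  obtain ⟨t, hout⟩ : ∃ t, front.reverse ++ back = c :: t := by
    cases h : front.reverse ++ back with
    | nil => rw [h] at hhead; simp at hhead
    | cons a t => rw [h] at hhead; simp at hhead; exact ⟨t, by rw [hhead]⟩
  have hd : t.find? (· != c) = d := by
    rw [hout] at hfind; simpa using hfind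
  by_cases h1 : c < x
  · have hcx : c ≠ x := ne_of_lt h1
    simp only [getW_altStep, if_pos h1]
    refine ⟨?_, ?_, ?_⟩
    · rw [aStep, pyStrGT_char, hout, List.find?_cons_of_pos (by simp [hcx])]
      simp [h1, hout]
    · simp
    · simp only [List.reverse_append, List.reverse_cons, List.reverse_nil, List.nil_append,
        List.cons_append]
      rw [List.find?_cons_of_neg (by simp), hout,
        List.find?_cons_of_pos (by simp [hcx])]
  · rcases d with _ | n
    · -- d = none: the result so far is homogeneous, always append
      simp only [getW_altStep, if_neg h1]
      rw [if_neg (by simp)]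
      have hfalse : pyStrGT (x :: (front.reverse ++ back)) ((front.reverse ++ back) ++ [x]) = false := by
        rw [pyStrGT_char, hout]
        by_cases hxc : x = c
        · subst hxc
          rw [List.find?_cons_of_neg (by simp), hd]
        · have hlt : x < c := lt_of_le_of_ne (not_lt.mp h1) hxc
          rw [List.find?_cons_of_pos (by simp [Ne.symm hxc])]
          simp [not_lt.mpr (le_of_lt hlt)]
      refine ⟨?_, ?_, ?_⟩
      · rw [aStep, hfalse]
        simp
      · rw [show front.reverse ++ (back ++ [x]) = (front.reverse ++ back) ++ [x] by simp,
          List.head?_append_of_ne_nil _ (by rw [hout]; simp), hhead]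
      · rw [show front.reverse ++ (back ++ [x]) = (front.reverse ++ back) ++ [x] by simp,
          List.find?_append, hfind]
        by_cases hxc : x = c
        · subst hxc
          rw [if_neg (by simp)]
          simp
        · have hlt : x < c := lt_of_le_of_ne (not_lt.mp h1) hxc
          rw [if_pos ⟨hlt, trivial⟩]
          simp [hxc]
    · -- d = some n
      by_cases h2 : x = c ∧ n < c
      · obtain ⟨hx, hn⟩ := h2
        subst hx
        simp only [getW_altStep, if_neg h1]
        rw [if_pos (by simp [hn])]
        refine ⟨?_, ?_, ?_⟩
        · rw [aStep, pyStrGT_char, hout, List.find?_cons_of_neg (by simp), hd]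
          simp [hn, hout]
        · simp
        · simp only [List.reverse_append, List.reverse_cons, List.reverse_nil, List.nil_append,
            List.cons_append]
          rw [List.find?_cons_of_neg (by simp), hout, List.find?_cons_of_neg (by simp), hd]
      · have hcond : ¬ ((x == c && decide (n < c)) = true) := by simpa using h2
        simp only [getW_altStep, if_neg h1]
        rw [if_neg hcond]
        have hfalse : pyStrGT (x :: (front.reverse ++ back)) ((front.reverse ++ back) ++ [x]) = false := by
          rw [pyStrGT_char, hout]
          by_cases hxc : x = c
          · subst hxc
            rw [List.find?_cons_of_neg (by simp), hd]
            have : ¬ n < x := fun hn => h2 ⟨rfl, hn⟩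
            simpa using this
          · have hlt : x < c := lt_of_le_of_ne (not_lt.mp h1) hxc
            rw [List.find?_cons_of_pos (by simp [Ne.symm hxc])]
            simp [not_lt.mpr (le_of_lt hlt)]
        refine ⟨?_, ?_, ?_⟩
        · rw [aStep, hfalse]
          simp
        · rw [show front.reverse ++ (back ++ [x]) = (front.reverse ++ back) ++ [x] by simp,
            List.head?_append_of_ne_nil _ (by rw [hout]; simp), hhead]
        · rw [show front.reverse ++ (back ++ [x]) = (front.reverse ++ back) ++ [x] by simp,
            List.find?_append, hfind, if_neg (by simp)]
          simp

theorem main_inv (rest : List Char) (front back : List Char) (c : Char) (d : Option Char)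
    (hhead : (front.reverse ++ back).head? = some c)
    (hfind : (front.reverse ++ back).find? (· != c) = d) :
    (rest.foldl getW_altStep (front, back, c, d)).1.reverse
        ++ (rest.foldl getW_altStep (front, back, c, d)).2.1
      = rest.foldl aStep (front.reverse ++ back) := by
  induction rest generalizing front back c d with
  | nil => simp
  | cons x xs ih =>
    obtain ⟨heq, hh, hf⟩ := step_inv front back c d x hhead hfind
    simp only [List.foldl_cons]
    rcases hst : getW_altStep (front, back, c, d) x with ⟨f', b', c', d'⟩
    rw [hst] at heq hh hf
    rw [← heq]
    exact ih f' b' c' d' hh hf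

-- ===== VERDICT (by name: the statement is the Claim_ definition above) =====
theorem getW_spec : Claim_equal_getW := by
  intro s _
  unfold Spec_getW getW getW_alt
  cases hs : s.toList with
  | nil => rfl
  | cons first rest =>
    have h0 : aStep [] first = [first] := by simp [aStep, pyStrGT]
    have hmain := main_inv rest [first] [] first none (by simp) (by simp [List.find?])
    rw [show ([first].reverse ++ ([] : List Char)) = [first] by simp] at hmain
    simp only [List.foldl_cons]
    show String.ofList (List.foldl aStep (aStep [] first) rest) = _
    rw [h0, ← hmain]
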